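-- pv_equiv track=rewrite | github.com/ayoubzulfiqar/Leetcode-Medium | TheMostFrequentlyOrderedProductsforEachCustomer/the_most_frequently_ordered_products_for_each_customer.py | get_most_frequently_ordered_products
-- ===== SOURCE A (Python) =====
-- import collections
--
-- def get_most_frequently_ordered_products(orders):
--     customer_product_counts = collections.defaultdict(collections.Counter)
--
--     for customer_id, product_id in orders:
--         customer_product_counts[customer_id][product_id] += 1
--
--     result = {}
--
--     for customer_id, product_counts in customer_product_counts.items():
--         max_freq = product_counts.most_common(1)[0][1]
--
--         most_frequent_products = []
--         for product, count in product_counts.items():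
--             if count == max_freq:
--                 most_frequent_products.append(product)
--
--         most_frequent_products.sort()
--         result[customer_id] = most_frequent_products
--
--     return result
-- ===== SOURCE B (Python) =====
-- def get_most_frequently_ordered_products(orders):
--     # One flat count over (customer, product) pairs instead of nested per-customer counters.
--     pair_counts = {}
--     for pair in orders:
--         pair_counts[pair] = pair_counts.get(pair, 0) + 1
--
--     # Running maximum frequency per customer (keys appear in first-order order).
--     best = {}
--     for (c, _p), n in pair_counts.items():
--         if n > best.get(c, 0):
--             best[c] = n
--
--     return {c: sorted(p for (cc, p), n in pair_counts.items()
--                       if cc == c and n == m)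
--             for c, m in best.items()}
-- ===== Notes on version B (the rewrite author's own statement) =====
-- stated objective: alternative
-- what changed: Replaces the nested per-customer Counter plus most_common(1)-then-rescan with a single flat count over (customer, product) pairs, a running-max dict of best frequencies per customer, and one comprehension that reads the answer off the flat count.
import Mathlib
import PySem

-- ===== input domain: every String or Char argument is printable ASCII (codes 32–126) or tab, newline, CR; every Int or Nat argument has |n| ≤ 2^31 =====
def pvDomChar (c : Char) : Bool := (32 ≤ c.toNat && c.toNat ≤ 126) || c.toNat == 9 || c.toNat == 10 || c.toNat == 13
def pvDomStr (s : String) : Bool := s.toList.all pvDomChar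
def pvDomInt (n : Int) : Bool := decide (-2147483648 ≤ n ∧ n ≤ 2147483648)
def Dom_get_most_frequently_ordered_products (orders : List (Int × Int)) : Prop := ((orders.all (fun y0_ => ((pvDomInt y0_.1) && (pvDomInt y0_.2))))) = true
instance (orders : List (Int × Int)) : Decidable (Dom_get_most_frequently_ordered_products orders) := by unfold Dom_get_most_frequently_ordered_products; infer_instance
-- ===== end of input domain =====

-- B replaces A's nested per-customer counters and most_common(1)-then-filter with one
-- flat (customer, product) pair count, a running-max dict and a comprehension; alternative
-- representation, similar cost.


-- ===== PORT A =====
def get_most_frequently_ordered_products (orders : List (Int × Int)) : List (Int × List Int) :=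
  let customer_product_counts : PySem.Dict Int (PySem.Dict Int Int) :=
    orders.foldl (fun d cp =>
      d.modify cp.1 PySem.Dict.empty (fun pc => pc.modify cp.2 0 (· + 1))) PySem.Dict.empty
  let result : PySem.Dict Int (List Int) :=
    customer_product_counts.items.foldl (fun result cp =>
      -- most_common(1)[0][1]: count of a first most-common item (the match's none
      -- branch is unreachable: every inner counter is nonempty)
      match PySem.List.max? cp.2.items (fun p => p.2) with
      | none => result
      | some top =>
        let max_freq := top.2
        let most_frequent_products : List Int :=
          cp.2.items.foldl (fun acc p => if p.2 == max_freq then acc ++ [p.1] else acc) []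
        result.insert cp.1 (PySem.List.sorted most_frequent_products (fun x => x) false))
      PySem.Dict.empty
  result.items

-- ===== PORT B =====
def get_most_frequently_ordered_products_alt (orders : List (Int × Int)) : List (Int × List Int) :=
  let pair_counts : PySem.Dict (Int × Int) Int :=
    orders.foldl (fun d pair => d.insert pair (d.getD pair 0 + 1)) PySem.Dict.empty
  let best : PySem.Dict Int Int :=
    pair_counts.items.foldl (fun b pn =>
      if b.getD pn.1.1 0 < pn.2 then b.insert pn.1.1 pn.2 else b) PySem.Dict.empty
  -- the final dict comprehension, built key by key (keys of best are distinct)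
  (best.items.foldl (fun r cm =>
      r.insert cm.1 (PySem.List.sorted
        ((pair_counts.items.filter (fun pn => pn.1.1 == cm.1 && pn.2 == cm.2)).map
          (fun pn => pn.1.2)) (fun x => x) false)) PySem.Dict.empty).items

-- ===== PRECONDITION & SPEC =====
def Spec_get_most_frequently_ordered_products (orders : List (Int × Int)) (out : List (Int × List Int)) : Prop := out = get_most_frequently_ordered_products_alt orders
instance (orders : List (Int × Int)) (out : List (Int × List Int)) : Decidable (Spec_get_most_frequently_ordered_products orders out) := by unfold Spec_get_most_frequently_ordered_products; infer_instance

-- ===== CLAIM (what is proved, stated in full; the proofs are below) =====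
def Claim_equal_get_most_frequently_ordered_products : Prop := ∀ (orders : List (Int × Int)), Dom_get_most_frequently_ordered_products orders → Spec_get_most_frequently_ordered_products orders (get_most_frequently_ordered_products orders)

-- ===== LEMMAS AND PROOFS =====

theorem pvAddMem {α : Type} [BEq α] [LawfulBEq α] (s : List α) (a : α) (h : a ∈ s) : PySem.Set.add s a = s := by
  simp [PySem.Set.add, PySem.Set.contains, h]

theorem pvAddNotMem {α : Type} [BEq α] [LawfulBEq α] (s : List α) (a : α) (h : ¬ a ∈ s) : PySem.Set.add s a = s ++ [a] := by
  simp [PySem.Set.add, PySem.Set.contains, h]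

theorem pvOfListSnoc {α : Type} [BEq α] (xs : List α) (x : α) :
    PySem.Set.ofList (xs ++ [x]) = PySem.Set.add (PySem.Set.ofList xs) x := by
  simp [PySem.Set.ofList_eq_foldl]

-- L0
theorem pvOfListMapOfList (f : Int × Int → Int) (xs : List (Int × Int)) :
    PySem.Set.ofList ((PySem.Set.ofList xs).map f) = PySem.Set.ofList (xs.map f) := by
  induction xs using List.reverseRecOn with
  | nil => rfl
  | append_singleton xs x ih =>
    rw [pvOfListSnoc]
    by_cases hx : x ∈ PySem.Set.ofList xs
    · rw [pvAddMem _ _ hx, ih, List.map_append, List.map_singleton, pvOfListSnoc]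
      have hfx : f x ∈ PySem.Set.ofList (xs.map f) := by
        rw [PySem.Set.mem_ofList]
        exact List.mem_map_of_mem ((PySem.Set.mem_ofList xs x).mp hx)
      rw [pvAddMem _ _ hfx]
    · rw [pvAddNotMem _ _ hx, List.map_append, List.map_singleton, pvOfListSnoc, ih,
        List.map_append, List.map_singleton, pvOfListSnoc]

-- L3
theorem pvFilterMapOfList (c : Int) (xs : List (Int × Int)) :
    ((PySem.Set.ofList xs).filter (fun q => q.1 == c)).map (fun q => q.2)
      = PySem.Set.ofList ((xs.filter (fun q => q.1 == c)).map (fun q => q.2)) := by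
  induction xs using List.reverseRecOn with
  | nil => rfl
  | append_singleton xs x ih =>
    rw [pvOfListSnoc]
    by_cases hx : x ∈ PySem.Set.ofList xs
    · rw [pvAddMem _ _ hx, ih, List.filter_append, List.map_append]
      by_cases hc : x.1 = c
      · have hmem : x.2 ∈ (xs.filter (fun q => q.1 == c)).map (fun q => q.2) := by
          refine List.mem_map.mpr ⟨x, List.mem_filter.mpr ⟨(PySem.Set.mem_ofList xs x).mp hx, by simp [hc]⟩, rfl⟩
        simp [hc, pvOfListSnoc,
          pvAddMem _ _ ((PySem.Set.mem_ofList _ _).mpr hmem)]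
      · simp [hc]
    · rw [pvAddNotMem _ _ hx, List.filter_append, List.filter_append, List.map_append]
      by_cases hc : x.1 = c
      · have hnot : ¬ x.2 ∈ PySem.Set.ofList ((xs.filter (fun q => q.1 == c)).map (fun q => q.2)) := by
          rw [PySem.Set.mem_ofList]
          rintro hmem
          obtain ⟨q, hq, hq2⟩ := List.mem_map.mp hmem
          obtain ⟨hqmem, hqc⟩ := List.mem_filter.mp hq
          have : q = x := by
            cases q; cases x; simp_all
          exact hx ((PySem.Set.mem_ofList xs x).mpr (this ▸ hqmem))
        simp only [List.map_append] at *
        simp [hc, pvOfListSnoc, ih, pvAddNotMem _ _ hnot]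
      · simp [hc, ih]

theorem pvNestedGetD (orders : List (Int × Int)) (d : PySem.Dict Int (PySem.Dict Int Int)) (c : Int) :
    (orders.foldl (fun d cp => d.modify cp.1 PySem.Dict.empty (fun pc => pc.modify cp.2 0 (· + 1))) d).getD c PySem.Dict.empty
      = ((orders.filter (fun o => o.1 == c)).map (fun o => o.2)).foldl
          (fun pc p => pc.modify p 0 (· + 1)) (d.getD c PySem.Dict.empty) := by
  induction orders generalizing d with
  | nil => rfl
  | cons o t ih =>
    simp only [List.foldl_cons, List.filter_cons]
    by_cases hc : o.1 = c
    · simp [hc, ih]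
    · have hb : (o.1 == c) = false := by simp [hc]
      simp only [hb, Bool.false_eq_true, if_false, ih, PySem.Dict.getD_modify]
      rw [if_neg (fun h => hc h.symm)]

-- B1: best getD
theorem pvBestGetD (l : List ((Int × Int) × Int)) (b : PySem.Dict Int Int) (c : Int) :
    (l.foldl (fun b pn => if b.getD pn.1.1 0 < pn.2 then b.insert pn.1.1 pn.2 else b) b).getD c 0
      = l.foldl (fun a pn => if pn.1.1 = c then max a pn.2 else a) (b.getD c 0) := by
  induction l generalizing b with
  | nil => rfl
  | cons pn t ih =>
    simp only [List.foldl_cons]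
    by_cases hc : pn.1.1 = c
    · rw [if_pos hc]
      by_cases hlt : b.getD pn.1.1 0 < pn.2
      · rw [if_pos hlt, ih, PySem.Dict.getD_insert]
        rw [if_pos hc.symm]
        congr 1
        rw [hc] at hlt
        omega
      · rw [if_neg hlt, ih]
        congr 1
        rw [hc] at hlt
        omega
    · rw [if_neg hc]
      by_cases hlt : b.getD pn.1.1 0 < pn.2
      · rw [if_pos hlt, ih, PySem.Dict.getD_insert, if_neg (fun h => hc h.symm)]
      · rw [if_neg hlt, ih]

-- B2: best keys (all counts positive)
theorem pvBestKeys (l : List ((Int × Int) × Int)) (b : PySem.Dict Int Int)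
    (hpos : ∀ pn ∈ l, 0 < pn.2) (hnn : ∀ k, 0 ≤ b.getD k 0) :
    (l.foldl (fun b pn => if b.getD pn.1.1 0 < pn.2 then b.insert pn.1.1 pn.2 else b) b).keys
      = PySem.Set.update b.keys (l.map (fun pn => pn.1.1)) := by
  induction l generalizing b with
  | nil => rfl
  | cons pn t ih =>
    simp only [List.foldl_cons, List.map_cons, PySem.Set.update, List.foldl_cons]
    by_cases hlt : b.getD pn.1.1 0 < pn.2
    · rw [if_pos hlt]
      rw [ih _ (fun q hq => hpos q (List.mem_cons_of_mem _ hq))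
            (fun k => by rw [PySem.Dict.getD_insert]; split
                         · have := hpos pn List.mem_cons_self; omega
                         · exact hnn k)]
      congr 1
      -- keys of insert = Set.add keys key
      by_cases hk : b.contains pn.1.1
      · rw [PySem.Dict.keys_insert_of_contains _ _ hk]
        rw [pvAddMem]
        exact (PySem.Dict.contains_iff_mem_keys _ _).mp hk
      · rw [PySem.Dict.keys_insert_of_not_contains _ _ (by simpa using hk)]
        rw [pvAddNotMem]
        intro hmem
        exact hk ((PySem.Dict.contains_iff_mem_keys _ _).mpr hmem)
    · rw [if_neg hlt]
      rw [ih _ (fun q hq => hpos q (List.mem_cons_of_mem _ hq)) hnn]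
      congr 1
      -- not inserted: key already present (getD ≥ count > 0 means contains)
      have hcont : b.contains pn.1.1 := by
        by_contra hnc
        have : b.getD pn.1.1 0 = 0 := PySem.Dict.getD_of_not_contains _ _ (by simpa using hnc)
        have := hpos pn List.mem_cons_self
        omega
      rw [pvAddMem]
      exact (PySem.Dict.contains_iff_mem_keys _ _).mp hcont

def pvPc (orders : List (Int × Int)) (c : Int) : List Int := (orders.filter (fun o => o.1 == c)).map (fun o => o.2)
def pvValA (pc : PySem.Dict Int Int) : List Int :=
  match PySem.List.max? pc.items (fun p => p.2) with
  | none => []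
  | some top => PySem.List.sorted ((pc.items.filter (fun p => p.2 == top.2)).map (fun p => p.1)) (fun x => x) false


theorem pvCountFilter (orders : List (Int × Int)) (c : Int) (q : Int × Int) (h : q.1 = c) :
    ((orders.filter (fun o => o.1 == c)).map (fun o => o.2)).count q.2 = orders.count q := by
  simp only [List.count_eq_countP, List.countP_map, List.countP_filter]
  apply List.countP_congr
  intro o _
  cases q with | mk q1 q2 =>
  cases o with | mk o1 o2 =>
  simp_all [Function.comp, Prod.ext_iff, and_comm]

theorem pvSideA' (orders : List (Int × Int)) :
    get_most_frequently_ordered_products orders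
    = (PySem.Set.ofList (orders.map (fun o => o.1))).map
        (fun c => (c, pvValA (PySem.Dict.counter (pvPc orders c)))) := by
  simp only [get_most_frequently_ordered_products]
  set nested : PySem.Dict Int (PySem.Dict Int Int) := orders.foldl (fun d cp =>
      d.modify cp.1 PySem.Dict.empty (fun pc => pc.modify cp.2 0 (· + 1))) PySem.Dict.empty with hn
  have hkeys : nested.keys = PySem.Set.ofList (orders.map (fun o => o.1)) := by
    rw [hn, PySem.Dict.keys_foldl_modify_key orders (fun o => o.1) PySem.Dict.empty
      (fun d cp pc => pc.modify cp.2 0 (· + 1)) PySem.Dict.empty]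
    simp [PySem.Dict.keys_empty, PySem.Set.update, PySem.Set.ofList_eq_foldl]
  have hnodup : nested.keys.Nodup := by
    rw [hkeys]; exact PySem.Set.nodup_ofList _
  have hgetD : ∀ c, nested.getD c PySem.Dict.empty = PySem.Dict.counter (pvPc orders c) := by
    intro c
    rw [hn, pvNestedGetD, PySem.Dict.getD_empty]
    rfl
  have hitems : nested.items = (PySem.Set.ofList (orders.map (fun o => o.1))).map
      (fun c => (c, PySem.Dict.counter (pvPc orders c))) := by
    rw [PySem.Dict.items_eq_map_keys nested hnodup PySem.Dict.empty, hkeys]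
    exact List.map_congr_left (fun c _ => by rw [hgetD])
  -- each customer's order list is nonempty, so the inner counter's items are nonempty
  have hne : ∀ c ∈ PySem.Set.ofList (orders.map (fun o => o.1)),
      (PySem.Dict.counter (pvPc orders c)).items ≠ [] := by
    intro c hc
    rw [PySem.Set.mem_ofList] at hc
    obtain ⟨o, ho, hoc⟩ := List.mem_map.mp hc
    have : o.2 ∈ pvPc orders c :=
      List.mem_map.mpr ⟨o, List.mem_filter.mpr ⟨ho, by simp [hoc]⟩, rfl⟩
    rw [PySem.Dict.items_counter]
    simp only [ne_eq, List.map_eq_nil_iff]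
    intro hnil
    rw [← PySem.Set.mem_ofList (pvPc orders c) o.2] at this
    simp [hnil] at this
  -- rewrite the fold step into an unconditional insert
  rw [hitems]
  rw [PySem.List.foldl_congr_mem _ _
    (fun result cp => result.insert cp.1 (pvValA cp.2)) PySem.Dict.empty ?hcong]
  case hcong =>
    intro acc cp hcp
    obtain ⟨c, hc, rfl⟩ := List.mem_map.mp hcp
    have hne' := hne c hc
    cases hmax : PySem.List.max? (PySem.Dict.counter (pvPc orders c)).items (fun p => p.2) with
    | none => exact absurd ((PySem.List.max?_eq_none_iff _ _).mp hmax) hne'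
    | some top =>
      simp only [hmax, pvValA]
      rw [PySem.List.foldl_append_if (fun p : Int × Int => p.2 == top.2) (fun p => p.1)]
      simp
  rw [PySem.Dict.items_foldl_insert_fresh
        (l := (PySem.Set.ofList (orders.map (fun o => o.1))).map
          (fun c => (c, PySem.Dict.counter (pvPc orders c))))
        (k := fun cp => cp.1) (v := fun cp => pvValA cp.2) (d := PySem.Dict.empty)
        (fun a _ => PySem.Dict.contains_empty _)
        (by rw [List.map_map]
            simp [Function.comp_def])]
  simp [List.map_map, PySem.Dict.empty, Function.comp_def]

theorem pvSideB' (orders : List (Int × Int)) :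
    get_most_frequently_ordered_products_alt orders
    = (PySem.Set.ofList (orders.map (fun o => o.1))).map
        (fun c => (c,
          PySem.List.sorted
            (((PySem.Dict.counter orders).items.filter (fun pn =>
                pn.1.1 == c && pn.2 ==
                  ((PySem.Dict.counter orders).items.foldl
                    (fun a pn => if pn.1.1 = c then max a pn.2 else a) 0))).map (fun pn => pn.1.2))
            (fun x => x) false)) := by
  simp only [get_most_frequently_ordered_products_alt]
  rw [PySem.Dict.foldl_insert_getD_add_one_eq_counter]
  set pcs := (PySem.Dict.counter orders).items with hpcs
  set best : PySem.Dict Int Int := pcs.foldl (fun b pn =>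
      if b.getD pn.1.1 0 < pn.2 then b.insert pn.1.1 pn.2 else b) PySem.Dict.empty with hbest
  have hpos : ∀ pn ∈ pcs, 0 < pn.2 := by
    intro pn hpn
    rw [hpcs, PySem.Dict.items_counter] at hpn
    obtain ⟨q, hq, rfl⟩ := List.mem_map.mp hpn
    have : q ∈ orders := (PySem.Set.mem_ofList _ _).mp hq
    have := List.count_pos_iff.mpr this
    simp only []
    exact_mod_cast this
  have hkeys : best.keys = PySem.Set.ofList (orders.map (fun o => o.1)) := by
    rw [hbest, pvBestKeys pcs PySem.Dict.empty hpos
      (fun k => by rw [PySem.Dict.getD_empty])]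
    rw [PySem.Dict.keys_empty]
    have h1 : pcs.map (fun pn => pn.1.1) = (PySem.Set.ofList orders).map (fun q => q.1) := by
      rw [hpcs, PySem.Dict.items_counter, List.map_map]
      rfl
    have h2 : PySem.Set.update [] (pcs.map (fun pn => pn.1.1))
        = PySem.Set.ofList (pcs.map (fun pn => pn.1.1)) := by
      simp [PySem.Set.update, PySem.Set.ofList_eq_foldl]
    rw [h2, h1, pvOfListMapOfList]
  have hnodup : best.keys.Nodup := by rw [hkeys]; exact PySem.Set.nodup_ofList _
  have hgetD : ∀ c, best.getD c 0
      = pcs.foldl (fun a pn => if pn.1.1 = c then max a pn.2 else a) 0 := by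
    intro c
    rw [hbest, pvBestGetD, PySem.Dict.getD_empty]
  have hitems : best.items = (PySem.Set.ofList (orders.map (fun o => o.1))).map
      (fun c => (c, pcs.foldl (fun a pn => if pn.1.1 = c then max a pn.2 else a) 0)) := by
    rw [PySem.Dict.items_eq_map_keys best hnodup 0, hkeys]
    exact List.map_congr_left (fun c _ => by rw [hgetD])
  rw [hitems]
  rw [PySem.Dict.items_foldl_insert_fresh
        (l := (PySem.Set.ofList (orders.map (fun o => o.1))).map
          (fun c => (c, pcs.foldl (fun a pn => if pn.1.1 = c then max a pn.2 else a) 0)))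
        (k := fun cm => cm.1)
        (v := fun cm => PySem.List.sorted
          ((pcs.filter (fun pn => pn.1.1 == cm.1 && pn.2 == cm.2)).map (fun pn => pn.1.2))
          (fun x => x) false)
        (d := PySem.Dict.empty)
        (fun a _ => PySem.Dict.contains_empty _)
        (by rw [List.map_map]; simp [Function.comp_def])]
  simp [List.map_map, PySem.Dict.empty, Function.comp_def]

theorem pvPointwise (orders : List (Int × Int)) (c : Int)
    (hc : c ∈ PySem.Set.ofList (orders.map (fun o => o.1))) :
    pvValA (PySem.Dict.counter (pvPc orders c))
      = PySem.List.sorted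
          (((PySem.Dict.counter orders).items.filter (fun pn =>
              pn.1.1 == c && pn.2 ==
                ((PySem.Dict.counter orders).items.foldl
                  (fun a pn => if pn.1.1 = c then max a pn.2 else a) 0))).map (fun pn => pn.1.2))
          (fun x => x) false := by
  -- abbreviations
  set Pc := pvPc orders c with hPc
  set X : List (Int × Int) := (PySem.Set.ofList orders).filter (fun q => q.1 == c) with hX
  set m : Int := (PySem.Dict.counter orders).items.foldl
      (fun a pn => if pn.1.1 = c then max a pn.2 else a) 0 with hm
  -- Pc is nonempty
  obtain ⟨o, ho, hoc⟩ := List.mem_map.mp ((PySem.Set.mem_ofList _ _).mp hc)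
  have hoPc : o.2 ∈ Pc := List.mem_map.mpr ⟨o, List.mem_filter.mpr ⟨ho, by simp [hoc]⟩, rfl⟩
  -- counts in orders vs counts in Pc
  have hcnt : ∀ q : Int × Int, q.1 = c → (Pc.count q.2 : Int) = (orders.count q : Int) := by
    intro q hq
    rw [hPc]
    unfold pvPc
    exact_mod_cast pvCountFilter orders c q hq
  -- X maps to the distinct products of customer c
  have hXmap : X.map (fun q => q.2) = PySem.Set.ofList Pc := pvFilterMapOfList c orders
  -- the running max equals a fold over X's counts
  have hmX : m = (X.map (fun q => (orders.count q : Int))).foldl max 0 := by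
    rw [hm, PySem.Dict.items_counter, List.foldl_map]
    rw [PySem.List.foldl_ite_eq_foldl_filter (p := fun q : Int × Int => q.1 = c)
      (f := fun a q => max a ((orders.count q : Int)))]
    rw [List.foldl_map]
    congr 1
  -- X's count list is the count list of the distinct products
  have hK : X.map (fun q => (orders.count q : Int))
      = (PySem.Set.ofList Pc).map (fun p => (Pc.count p : Int)) := by
    rw [← hXmap, List.map_map]
    apply List.map_congr_left
    intro q hq
    have : q.1 = c := by
      have := (List.mem_filter.mp hq).2
      simpa using this
    simp only [Function.comp]
    rw [hcnt q this]
  -- unfold pvValA on the nonempty counter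
  rw [pvValA]
  cases hmax : PySem.List.max? (PySem.Dict.counter Pc).items (fun p => p.2) with
  | none =>
    exfalso
    have hnil := (PySem.List.max?_eq_none_iff _ _).mp hmax
    rw [PySem.Dict.items_counter] at hnil
    have : o.2 ∈ PySem.Set.ofList Pc := (PySem.Set.mem_ofList _ _).mpr hoPc
    simp [List.map_eq_nil_iff.mp hnil] at this
  | some top =>
    dsimp only
    -- m = top.2
    have htopmem := PySem.List.max?_mem hmax
    rw [PySem.Dict.items_counter] at htopmem
    obtain ⟨p0, hp0, hp0e⟩ := List.mem_map.mp htopmem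
    have htop2 : top.2 = (Pc.count p0 : Int) := by rw [← hp0e]
    have hisMax := PySem.List.max?_isMax hmax
    have hKle : ∀ v ∈ (PySem.Set.ofList Pc).map (fun p => (Pc.count p : Int)), v ≤ top.2 := by
      intro v hv
      obtain ⟨p, hp, rfl⟩ := List.mem_map.mp hv
      have : (p, (Pc.count p : Int)) ∈ (PySem.Dict.counter Pc).items := by
        rw [PySem.Dict.items_counter]
        exact List.mem_map.mpr ⟨p, hp, rfl⟩
      simpa using hisMax _ this
    have hfold := PySem.List.le_foldl_max ((PySem.Set.ofList Pc).map (fun p => (Pc.count p : Int))) 0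
    have hmem := PySem.List.foldl_max_mem ((PySem.Set.ofList Pc).map (fun p => (Pc.count p : Int))) 0
    have htopK : top.2 ∈ (PySem.Set.ofList Pc).map (fun p => (Pc.count p : Int)) := by
      rw [htop2]; exact List.mem_map.mpr ⟨p0, hp0, rfl⟩
    have hmeq : m = top.2 := by
      rw [hmX, hK]
      rcases hmem with h0 | hmemK
      · exfalso
        have h1 := hfold.2 _ htopK
        rw [h0] at h1
        have : 0 < Pc.count p0 := List.count_pos_iff.mpr ((PySem.Set.mem_ofList _ _).mp hp0)
        omega
      · exact le_antisymm (hKle _ hmemK) (hfold.2 _ htopK)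
    -- now the two product lists are equal
    congr 1
    rw [PySem.Dict.items_counter, PySem.Dict.items_counter]
    rw [List.filter_map, List.filter_map, List.map_map, List.map_map]
    have hpredA : ((fun p : Int × Int => p.2 == top.2) ∘ (fun k => (k, (Pc.count k : Int))))
        = fun p : Int => (Pc.count p : Int) == top.2 := by
      funext p; simp [Function.comp]
    have hpredB : ((fun pn : (Int × Int) × Int => pn.1.1 == c && pn.2 == m)
          ∘ (fun k => (k, (orders.count k : Int))))
        = fun q : Int × Int => q.1 == c && ((orders.count q : Int) == m) := by
      funext q; simp [Function.comp]
    rw [hpredA, hpredB]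
    have hmapA : ((fun p : Int × Int => p.1) ∘ (fun k : Int => (k, (Pc.count k : Int)))) = id := by
      funext p; simp [Function.comp]
    have hmapB : ((fun pn : (Int × Int) × Int => pn.1.2) ∘ (fun k : Int × Int => (k, (orders.count k : Int))))
        = fun q : Int × Int => q.2 := by
      funext q; simp [Function.comp]
    rw [hmapA, hmapB, List.map_id]
    -- split B's conjunctive filter
    have hsplit : (PySem.Set.ofList orders).filter (fun q => q.1 == c && ((orders.count q : Int) == m))
        = X.filter (fun q => (orders.count q : Int) == m) := by
      rw [hX, List.filter_filter]
      apply List.filter_congr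
      intro q _
      by_cases h1 : q.1 = c <;> simp [h1, Bool.and_comm]
    rw [hsplit]
    have hcongr : X.filter (fun q => (orders.count q : Int) == m)
        = X.filter ((fun p : Int => (Pc.count p : Int) == top.2) ∘ (fun q : Int × Int => q.2)) := by
      apply List.filter_congr
      intro q hq
      have hq1 : q.1 = c := by simpa using (List.mem_filter.mp hq).2
      simp only [Function.comp]
      rw [← hcnt q hq1, hmeq]
    rw [hcongr, ← List.filter_map, hXmap]

-- ===== VERDICT (by name: the statement is the Claim_ definition above) =====
theorem get_most_frequently_ordered_products_spec : Claim_equal_get_most_frequently_ordered_products := by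
  intro orders _
  unfold Spec_get_most_frequently_ordered_products
  rw [pvSideA' orders, pvSideB' orders]
  exact List.map_congr_left (fun c hc => by rw [pvPointwise orders c hc])
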